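-- pv_equiv track=rewrite | github.com/MoumenBaccouch/Algorithm-Checkpoint | Algorithm Checkpoint/Second Task.py | sum_of_distinct_elements
-- ===== SOURCE A (Python) =====
-- def sum_of_distinct_elements(set1, set2):
--   """Computes the sum of all distinct elements from two sets.
--
--   Args:
--     set1: A list of elements.
--     set2: A list of elements.
--
--   Returns:
--     The sum of all distinct elements from two sets.
--   """
--
--   sum = 0
--   distinct_elements = set()
--   for element in set1:
--     if element not in distinct_elements:
--       sum += element
--       distinct_elements.add(element)
--   for element in set2:
--     if element not in distinct_elements:
--       sum += element
--       distinct_elements.add(element)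
--   return sum
-- ===== SOURCE B (Python) =====
-- def sum_of_distinct_elements(set1, set2):
--   """Computes the sum of all distinct elements from two sets.
--
--   Sort-then-scan: after sorting the concatenation, equal elements are
--   adjacent, so summing every element different from its predecessor
--   sums each distinct value exactly once.
--   """
--   total = 0
--   prev = None
--   for x in sorted(set1 + set2):
--     if x != prev:
--       total += x
--     prev = x
--   return total
-- ===== Notes on version B (the rewrite author's own statement) =====
-- stated objective: alternative
-- what changed: Replaces A's hash-set membership-check-and-accumulate loops with sort-then-scan deduplication: sort the concatenation of both lists once, then a single pass sums each element that differs from its predecessor.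
import Mathlib
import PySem

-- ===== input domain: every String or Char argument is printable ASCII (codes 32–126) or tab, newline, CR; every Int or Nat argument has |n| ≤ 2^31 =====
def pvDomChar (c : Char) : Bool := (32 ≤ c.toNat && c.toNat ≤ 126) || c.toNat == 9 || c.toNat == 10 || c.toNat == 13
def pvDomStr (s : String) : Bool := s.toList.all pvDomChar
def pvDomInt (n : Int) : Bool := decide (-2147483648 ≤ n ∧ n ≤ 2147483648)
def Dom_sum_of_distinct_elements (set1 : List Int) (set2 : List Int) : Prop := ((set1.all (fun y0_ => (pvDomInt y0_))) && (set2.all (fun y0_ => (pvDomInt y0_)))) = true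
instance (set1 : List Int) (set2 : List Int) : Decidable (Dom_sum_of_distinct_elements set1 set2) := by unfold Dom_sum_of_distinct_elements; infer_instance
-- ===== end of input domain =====

-- B rewrite (alternative): instead of A's hash-set membership-check-and-accumulate loops,
-- B sorts the concatenation of both lists once and makes a single scan that adds each
-- element differing from its predecessor (equal elements are adjacent after sorting).

-- ===== PORT A =====
-- A's loop step: if element not seen, add it to the running sum and to the seen-set.
def pvStepA (p : Int × PySem.Set Int) (element : Int) : Int × PySem.Set Int :=
  if PySem.Set.contains p.2 element then p else (p.1 + element, PySem.Set.add p.2 element)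

def sum_of_distinct_elements (set1 : List Int) (set2 : List Int) : Int :=
  let p1 := set1.foldl pvStepA (0, PySem.Set.empty)
  let p2 := set2.foldl pvStepA p1
  p2.1

-- ===== PORT B =====
-- B's loop step over the sorted list: add x if it differs from the previous element, remember x.
def pvStepB (p : Int × Option Int) (x : Int) : Int × Option Int :=
  ((if some x ≠ p.2 then p.1 + x else p.1), some x)

def sum_of_distinct_elements_alt (set1 : List Int) (set2 : List Int) : Int :=
  ((PySem.List.sorted (set1 ++ set2) (fun x => x) false).foldl pvStepB (0, none)).1

-- ===== PRECONDITION & SPEC =====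
def Spec_sum_of_distinct_elements (set1 : List Int) (set2 : List Int) (out : Int) : Prop := out = sum_of_distinct_elements_alt set1 set2
instance (set1 : List Int) (set2 : List Int) (out : Int) : Decidable (Spec_sum_of_distinct_elements set1 set2 out) := by unfold Spec_sum_of_distinct_elements; infer_instance

-- ===== CLAIM (what is proved, stated in full; the proofs are below) =====
def Claim_equal_sum_of_distinct_elements : Prop := ∀ (set1 : List Int) (set2 : List Int), Dom_sum_of_distinct_elements set1 set2 → Spec_sum_of_distinct_elements set1 set2 (sum_of_distinct_elements set1 set2)

-- ===== LEMMAS AND PROOFS =====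

-- A's loop invariant: starting from a sum equal to the seen-set's sum, the pair stays
-- (sum of the seen-set, seen-set), and the final seen-set is Set.update of the start set.
theorem pvFoldA_invariant (xs : List Int) (s : Int) (seen : PySem.Set Int)
    (h : s = seen.sum) :
    xs.foldl pvStepA (s, seen) = ((PySem.Set.update seen xs).sum, PySem.Set.update seen xs) := by
  induction xs generalizing s seen with
  | nil => simp [PySem.Set.update, h]
  | cons x xs ih =>
    by_cases hc : x ∈ seen
    · rw [List.foldl_cons, show pvStepA (s, seen) x = (s, seen) from by simp [pvStepA, hc],
        ih s seen h, PySem.Set.update_cons, PySem.Set.add_of_mem hc]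
    · rw [List.foldl_cons,
        show pvStepA (s, seen) x = (s + x, PySem.Set.add seen x) from by simp [pvStepA, hc],
        ih _ _ (by rw [h, PySem.Set.add_of_not_mem hc]; simp),
        PySem.Set.update_cons]

-- The contribution of B's scan after state (t, prev): t plus the run-head sums.
def pvG (prev : Option Int) : List Int → Int
  | [] => 0
  | x :: xs => (if some x ≠ prev then x else 0) + pvG (some x) xs

theorem pvFoldB_eq_pvG (xs : List Int) (t : Int) (prev : Option Int) :
    (xs.foldl pvStepB (t, prev)).1 = t + pvG prev xs := by
  induction xs generalizing t prev with
  | nil => simp [pvG]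
  | cons x xs ih =>
    simp only [List.foldl_cons, pvStepB, pvG, ih]
    split_ifs <;> ring

-- On a sorted tail whose elements all dominate p, the scan from prev = some p sums
-- exactly the distinct elements of p :: xs, minus the p already counted.
theorem pvG_some_sorted (xs : List Int) (p : Int)
    (hs : xs.Pairwise (· ≤ ·)) (hp : ∀ y ∈ xs, p ≤ y) :
    pvG (some p) xs = (List.dedup (p :: xs)).sum - p := by
  induction xs generalizing p with
  | nil => simp [pvG]
  | cons x xs ih =>
    have hs' : xs.Pairwise (· ≤ ·) := hs.tail
    have hx : ∀ y ∈ xs, x ≤ y := fun y hy => (List.pairwise_cons.1 hs).1 y hy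
    by_cases hxp : x = p
    · subst hxp
      have hmem : x ∈ x :: xs := List.mem_cons_self
      rw [List.dedup_cons_of_mem hmem]
      simp only [pvG, ih x hs' hx]
      simp
    · have hpx : p ≤ x := hp x List.mem_cons_self
      have hpnot : p ∉ x :: xs := by
        intro hmem
        rcases List.mem_cons.1 hmem with h | h
        · exact hxp h.symm
        · have := hx p h
          have : p = x := le_antisymm hpx this
          exact hxp this.symm
      simp only [pvG, ne_eq, Option.some.injEq, if_pos (by simpa using hxp)]
      rw [ih x hs' hx, List.dedup_cons_of_notMem hpnot]
      simp
  
theorem pvG_none_sorted (xs : List Int) (hs : xs.Pairwise (· ≤ ·)) :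
    pvG none xs = (List.dedup xs).sum := by
  cases xs with
  | nil => simp [pvG]
  | cons x xs =>
    simp only [pvG, ne_eq, reduceCtorEq, not_false_eq_true, if_pos trivial]
    rw [pvG_some_sorted xs x hs.tail (fun y hy => (List.pairwise_cons.1 hs).1 y hy)]
    ring

-- Both results are the sum of a duplicate-free list with the members of set1 ++ set2.
theorem pv_perm_sum (l1 l2 : List Int) (h1 : l1.Nodup) (h2 : l2.Nodup)
    (hm : ∀ a, a ∈ l1 ↔ a ∈ l2) : l1.sum = l2.sum :=
  ((List.perm_ext_iff_of_nodup h1 h2).2 hm).sum_eq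

-- ===== VERDICT (by name: the statement is the Claim_ definition above) =====
theorem sum_of_distinct_elements_spec : Claim_equal_sum_of_distinct_elements := by
  intro set1 set2 _
  unfold Spec_sum_of_distinct_elements sum_of_distinct_elements sum_of_distinct_elements_alt
  simp only []
  rw [pvFoldA_invariant set1 0 PySem.Set.empty (by simp [PySem.Set.empty]),
    pvFoldA_invariant set2 _ _ rfl]
  rw [pvFoldB_eq_pvG,
    pvG_none_sorted _ (by simpa using PySem.List.sorted_pairwise (set1 ++ set2) (fun x => x) )]
  have hA : PySem.Set.update (PySem.Set.update PySem.Set.empty set1) set2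
      = PySem.Set.ofList (set1 ++ set2) := by
    rw [PySem.Set.ofList_eq_foldl]
    simp [PySem.Set.update, PySem.Set.empty, List.foldl_append]
  rw [hA]
  rw [zero_add]
  apply pv_perm_sum
  · exact PySem.Set.nodup_ofList _
  · exact List.nodup_dedup _
  · intro a
    rw [PySem.Set.mem_ofList, List.mem_dedup, PySem.List.mem_sorted]
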